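-- pv_equiv track=rewrite | github.com/Cycyber/CCPS109---Computer-Science-1 | labs109.py | count_growlers
-- ===== SOURCE A (Python) =====
-- def count_growlers(animals):
--     dogs, cats = [], []
--     cat_count, dog_count = 0, 0
--     growling_animals = 0
--     index = 0
--     length = len(animals)
--     for animal in animals:
--         if animal == 'dog' or animal == 'god':
--             dog_count += 1
--             dogs.append(dog_count)
--             cats.append(cat_count)
--         else:
--             cat_count += 1
--             dogs.append(dog_count)
--             cats.append(cat_count)
--     while index < len(animals):
--         if animals[index] == 'dog' or animals[index] == 'cat':
--             if index > 0 and dogs[index-1] > cats[index-1]: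
--                 growling_animals += 1
--         elif animals[index] == 'god' or animals[index] == 'tac':
--             if (dogs[length-1] - dogs[index]) > (cats[length-1] - cats[index]):
--                 growling_animals += 1
--         index += 1
--     return growling_animals
-- ===== SOURCE B (Python) =====
-- def count_growlers(animals):
--     total_dogs = sum(1 for a in animals if a == 'dog' or a == 'god')
--     total_cats = len(animals) - total_dogs
--     dogs_before = cats_before = 0
--     growlers = 0
--     for a in animals:
--         if a == 'dog' or a == 'cat':
--             if dogs_before > cats_before:
--                 growlers += 1
--         elif a == 'god' or a == 'tac':
--             dogs_after = total_dogs - dogs_before - (1 if a == 'god' else 0)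
--             cats_after = total_cats - cats_before - (1 if a == 'tac' else 0)
--             if dogs_after > cats_after:
--                 growlers += 1
--         if a == 'dog' or a == 'god':
--             dogs_before += 1
--         else:
--             cats_before += 1
--     return growlers
-- ===== Notes on version B (the rewrite author's own statement) =====
-- stated objective: simpler
-- what changed: Replaces A's two passes with materialised prefix dogs/cats lists and an index-based while loop by a single running-counter scan that derives the 'animals behind' counts from precomputed totals, using O(1) extra space instead of O(n).
import Mathlib
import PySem

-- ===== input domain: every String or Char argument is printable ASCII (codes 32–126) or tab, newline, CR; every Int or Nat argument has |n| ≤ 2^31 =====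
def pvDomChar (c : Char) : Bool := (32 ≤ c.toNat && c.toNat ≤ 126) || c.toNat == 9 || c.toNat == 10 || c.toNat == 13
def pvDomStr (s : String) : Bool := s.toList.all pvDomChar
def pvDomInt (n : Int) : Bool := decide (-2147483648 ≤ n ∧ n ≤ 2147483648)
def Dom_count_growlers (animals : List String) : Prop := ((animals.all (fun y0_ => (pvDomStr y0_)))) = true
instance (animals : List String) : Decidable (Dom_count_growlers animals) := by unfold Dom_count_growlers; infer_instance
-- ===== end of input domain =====

-- B replaces A's precomputed prefix-count lists and index-based second loop by a single
-- running-counter scan using the dog/cat totals (objective: simpler, one pass, O(1) extra space).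

-- ===== PORT A =====
-- first for-loop of A: builds the prefix lists dogs/cats and the running counts
def cgStep (st : List Int × List Int × Int × Int) (animal : String) : List Int × List Int × Int × Int :=
  if animal == "dog" || animal == "god" then
    (st.1 ++ [st.2.2.2 + 1], st.2.1 ++ [st.2.2.1], st.2.2.1, st.2.2.2 + 1)
  else
    (st.1 ++ [st.2.2.2], st.2.1 ++ [st.2.2.1 + 1], st.2.2.1 + 1, st.2.2.2)

-- A's while loop, recursion on the index; every list access is in range in Python
-- (dogs/cats have the same length as animals), so `getD` is exact here.
def cgLoop (animals : List String) (dogs cats : List Int) (idx : Nat) (g : Int) : Int :=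
  if h : idx < animals.length then
    let a := animals.getD idx ""
    let g' :=
      if a == "dog" || a == "cat" then
        if 0 < idx ∧ dogs.getD (idx - 1) 0 > cats.getD (idx - 1) 0 then g + 1 else g
      else if a == "god" || a == "tac" then
        if dogs.getD (animals.length - 1) 0 - dogs.getD idx 0 >
           cats.getD (animals.length - 1) 0 - cats.getD idx 0 then g + 1 else g
      else g
    cgLoop animals dogs cats (idx + 1) g'
  else g
termination_by animals.length - idx

def count_growlers (animals : List String) : Int :=
  let st := animals.foldl cgStep ([], [], 0, 0)
  cgLoop animals st.1 st.2.1 0 0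

-- ===== PORT B =====
def cgAltStep (D C : Int) (st : Int × Int × Int) (a : String) : Int × Int × Int :=
  let g :=
    if a == "dog" || a == "cat" then
      if st.1 > st.2.1 then st.2.2 + 1 else st.2.2
    else if a == "god" || a == "tac" then
      if D - st.1 - (if a == "god" then 1 else 0) > C - st.2.1 - (if a == "tac" then 1 else 0)
      then st.2.2 + 1 else st.2.2
    else st.2.2
  if a == "dog" || a == "god" then (st.1 + 1, st.2.1, g) else (st.1, st.2.1 + 1, g)

def count_growlers_alt (animals : List String) : Int :=
  let total_dogs : Int := ((animals.filter (fun a => a == "dog" || a == "god")).map (fun _ => (1 : Int))).sum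
  let total_cats : Int := (animals.length : Int) - total_dogs
  (animals.foldl (cgAltStep total_dogs total_cats) (0, 0, 0)).2.2

-- ===== PRECONDITION & SPEC =====
def Spec_count_growlers (animals : List String) (out : Int) : Prop := out = count_growlers_alt animals
instance (animals : List String) (out : Int) : Decidable (Spec_count_growlers animals out) := by unfold Spec_count_growlers; infer_instance

-- ===== CLAIM (what is proved, stated in full; the proofs are below) =====
def Claim_equal_count_growlers : Prop := ∀ (animals : List String), Dom_count_growlers animals → Spec_count_growlers animals (count_growlers animals)

-- ===== LEMMAS AND PROOFS =====

-- number of "dog"/"god" entries, as an Int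
def dcInt (l : List String) : Int := (l.countP (fun a => a == "dog" || a == "god") : Int)

-- A's prefix lists, characterised
def dogsL (l : List String) : List Int := (List.range l.length).map (fun k => dcInt (l.take (k + 1)))
def catsL (l : List String) : List Int :=
  (List.range l.length).map (fun (k : Nat) => ((k : Int) + 1) - dcInt (l.take (k + 1)))

-- the common growl count: D/C totals, db/cb counts of animals already passed
def cgSpec (D C db cb : Int) : List String → Int
  | [] => 0
  | a :: t =>
    (if a == "dog" || a == "cat" then
       if db > cb then (1 : Int) else 0
     else if a == "god" || a == "tac" then
       if D - db - (if a == "god" then 1 else 0) > C - cb - (if a == "tac" then 1 else 0)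
       then (1 : Int) else 0
     else 0)
    + if a == "dog" || a == "god" then cgSpec D C (db + 1) cb t else cgSpec D C db (cb + 1) t

lemma dcInt_append (l₁ l₂ : List String) : dcInt (l₁ ++ l₂) = dcInt l₁ + dcInt l₂ := by
  simp [dcInt, List.countP_append]

lemma dcInt_singleton (a : String) :
    dcInt [a] = if a == "dog" || a == "god" then 1 else 0 := by
  by_cases h : (a == "dog" || a == "god") = true <;> simp [dcInt, h]

lemma dcInt_cons (a : String) (t : List String) :
    dcInt (a :: t) = (if a == "dog" || a == "god" then 1 else 0) + dcInt t := by
  have := dcInt_append [a] t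
  simp only [List.singleton_append] at this
  rw [this, dcInt_singleton]

lemma dcInt_nonneg (l : List String) : 0 ≤ dcInt l := Int.natCast_nonneg _

lemma dcInt_le_length (l : List String) : dcInt l ≤ (l.length : Int) :=
  Int.ofNat_le.mpr List.countP_le_length

lemma phase1_eq (l : List String) : ∀ (dogs cats : List Int) (cc dcnt : Int),
    l.foldl cgStep (dogs, cats, cc, dcnt) =
      (dogs ++ (List.range l.length).map (fun k => dcnt + dcInt (l.take (k + 1))),
       cats ++ (List.range l.length).map (fun (k : Nat) => cc + ((k : Int) + 1 - dcInt (l.take (k + 1)))),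
       cc + ((l.length : Int) - dcInt l), dcnt + dcInt l) := by
  induction l with
  | nil => intro dogs cats cc dcnt; simp [dcInt]
  | cons a t ih =>
    intro dogs cats cc dcnt
    have hrs : List.range (t.length + 1) = 0 :: (List.range t.length).map Nat.succ :=
      List.range_succ_eq_map
    have hdc : ∀ m : List String,
        dcInt (a :: m) = (if a == "dog" || a == "god" then 1 else 0) + dcInt m := fun m => dcInt_cons a m
    by_cases h : (a == "dog" || a == "god") = true
    · simp only [List.foldl_cons, cgStep]
      rw [if_pos h, ih]
      simp only [List.length_cons, hrs, List.map_cons, List.map_map]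
      refine Prod.ext ?_ (Prod.ext ?_ (Prod.ext ?_ ?_))
      · show dogs ++ [dcnt + 1] ++ _ = dogs ++ _ :: _
        rw [List.append_assoc, List.singleton_append]
        congr 1
        congr 1
        · simp [List.take_succ_cons, dcInt_singleton, h]
        · apply List.map_congr_left; intro k _
          simp [Function.comp, List.take_succ_cons, hdc, h]; ring
      · show cats ++ [cc] ++ _ = cats ++ _ :: _
        rw [List.append_assoc, List.singleton_append]
        congr 1
        congr 1
        · simp [List.take_succ_cons, dcInt_singleton, h]
        · apply List.map_congr_left; intro k _
          simp [Function.comp, List.take_succ_cons, hdc, h]; ring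
      · simp [hdc, h]; ring
      · simp [hdc, h]; ring
    · simp only [List.foldl_cons, cgStep]
      rw [if_neg h, ih]
      simp only [List.length_cons, hrs, List.map_cons, List.map_map]
      refine Prod.ext ?_ (Prod.ext ?_ (Prod.ext ?_ ?_))
      · show dogs ++ [dcnt] ++ _ = dogs ++ _ :: _
        rw [List.append_assoc, List.singleton_append]
        congr 1
        congr 1
        · simp [List.take_succ_cons, dcInt_singleton, h]
        · apply List.map_congr_left; intro k _
          simp [Function.comp, List.take_succ_cons, hdc, h]
      · show cats ++ [cc + 1] ++ _ = cats ++ _ :: _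
        rw [List.append_assoc, List.singleton_append]
        congr 1
        congr 1
        · simp [List.take_succ_cons, dcInt_singleton, h]
        · apply List.map_congr_left; intro k _
          simp [Function.comp, List.take_succ_cons, hdc, h]; ring
      · simp [hdc, h]; ring
      · simp [hdc, h]

lemma cgLoop_eq (animals : List String) : ∀ (m idx : Nat), animals.length - idx = m → ∀ g : Int,
    cgLoop animals (dogsL animals) (catsL animals) idx g
      = g + cgSpec (dcInt animals) ((animals.length : Int) - dcInt animals)
              (dcInt (animals.take idx)) ((idx : Int) - dcInt (animals.take idx))
              (animals.drop idx) := by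
  intro m
  induction m with
  | zero =>
    intro idx hm g
    have hge : animals.length ≤ idx := by omega
    rw [cgLoop, dif_neg (by omega)]
    simp [List.drop_eq_nil_of_le hge, cgSpec]
  | succ m ih =>
    intro idx hm g
    have h : idx < animals.length := by omega
    have hpos : 0 < animals.length := by omega
    have hgetd : animals.getD idx "" = animals[idx] := List.getD_eq_getElem animals "" h
    set a := animals[idx] with ha
    have hdrop : animals.drop idx = a :: animals.drop (idx + 1) := List.drop_eq_getElem_cons h
    have htake : animals.take (idx + 1) = animals.take idx ++ [a] := by
      rw [List.take_succ, List.getElem?_eq_getElem h]; rfl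
    have hdc1 : dcInt (animals.take (idx + 1))
        = dcInt (animals.take idx) + (if a == "dog" || a == "god" then 1 else 0) := by
      rw [htake, dcInt_append, dcInt_singleton]
    have hdg : ∀ k, k < animals.length → (dogsL animals).getD k 0 = dcInt (animals.take (k + 1)) :=
      fun k hk => PySem.List.getD_map_range _ _ _ _ hk
    have hcg : ∀ k, k < animals.length →
        (catsL animals).getD k 0 = ((k : Int) + 1) - dcInt (animals.take (k + 1)) :=
      fun k hk => PySem.List.getD_map_range _ _ _ _ hk
    have hlast_d : (dogsL animals).getD (animals.length - 1) 0 = dcInt animals := by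
      rw [hdg _ (by omega), Nat.sub_add_cancel hpos, List.take_length]
    have hlast_c : (catsL animals).getD (animals.length - 1) 0
        = (animals.length : Int) - dcInt animals := by
      rw [hcg _ (by omega), Nat.sub_add_cancel hpos, List.take_length]
      have : ((animals.length - 1 : Nat) : Int) = (animals.length : Int) - 1 := by
        omega
      push_cast; rw [this]; ring
    -- unfold one loop iteration
    rw [cgLoop, dif_pos h]
    simp only [hgetd]
    rw [ih (idx + 1) (by omega)]
    rw [hdrop]
    -- abbreviations
    set n : Int := (animals.length : Int) with hn
    set D : Int := dcInt animals with hD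
    set db : Int := dcInt (animals.take idx) with hdb
    have hdb0 : 0 ≤ db := dcInt_nonneg _
    have hdbidx : db ≤ (idx : Int) := by
      calc db ≤ ((animals.take idx).length : Int) := dcInt_le_length _
        _ ≤ (idx : Int) := by simp [List.length_take]
    simp only [cgSpec]
    by_cases hdog : (a == "dog" || a == "god") = true
    · -- a counts as a dog in the prefix lists
      simp only [hdc1, if_pos hdog]
      by_cases h1 : (a == "dog" || a == "cat") = true
      · -- right-facing dog ("dog"); A's guard idx > 0 is redundant since db = cb = 0 there
        simp only [if_pos h1]
        have hcond : (0 < idx ∧ (dogsL animals).getD (idx - 1) 0 > (catsL animals).getD (idx - 1) 0)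
            ↔ db > (idx : Int) - db := by
          rcases Nat.eq_zero_or_pos idx with h0 | h0
          · subst h0
            simp only [lt_irrefl, false_and, false_iff]
            simp [hdb, dcInt]
          · have e1 : (dogsL animals).getD (idx - 1) 0 = db := by
              rw [hdg _ (by omega), Nat.sub_add_cancel h0]
            have e2 : (catsL animals).getD (idx - 1) 0 = (idx : Int) - db := by
              rw [hcg _ (by omega), Nat.sub_add_cancel h0]
              have : ((idx - 1 : Nat) : Int) = (idx : Int) - 1 := by omega
              push_cast; rw [this]; ring
            rw [e1, e2]
            constructor
            · rintro ⟨-, hlt⟩; exact hlt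
            · intro hlt; exact ⟨h0, hlt⟩
        by_cases hc : db > (idx : Int) - db
        · rw [if_pos (hcond.mpr hc), if_pos hc]
          have : ((idx : Int) + 1) - (db + 1) = (idx : Int) - db := by ring
          push_cast; rw [this]; ring
        · rw [if_neg (fun hx => hc (hcond.mp hx)), if_neg hc]
          have : ((idx : Int) + 1) - (db + 1) = (idx : Int) - db := by ring
          push_cast; rw [this]; ring
      · -- left-facing dog ("god")
        have hgod : (a == "god") = true := by
          cases hb1 : (a == "dog") <;> cases hb2 : (a == "god") <;> simp_all
        have h2 : (a == "god" || a == "tac") = true := by simp [hgod]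
        have htac : (a == "tac") = false := by
          by_contra hx
          have : a = "tac" := by simpa using (by simpa using hx : ¬ (a == "tac") = false)
          simp [this] at hgod
        have hflag1 : (if (a == "god") = true then (1:Int) else 0) = 1 := if_pos hgod
        have hflag2 : (if (a == "tac") = true then (1:Int) else 0) = 0 := by
          rw [if_neg]; simp [htac]
        simp only [if_neg h1, if_pos h2, hflag1, hflag2]
        have e1 : (dogsL animals).getD idx 0 = db + 1 := by
          rw [hdg _ h, hdc1, hdog]; rfl
        have e2 : (catsL animals).getD idx 0 = ((idx : Int) + 1) - (db + 1) := by
          rw [hcg _ h, hdc1, hdog]; rfl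
        rw [hlast_d, hlast_c, e1, e2]
        have hcond : (D - (db + 1) > n - D - (((idx : Int) + 1) - (db + 1)))
            ↔ (D - db - 1 > n - D - ((idx : Int) - db) - 0) := by constructor <;> intro <;> omega
        by_cases hc : D - db - 1 > n - D - ((idx : Int) - db) - 0
        · rw [if_pos (hcond.mpr hc), if_pos hc]
          have : ((idx : Int) + 1) - (db + 1) = (idx : Int) - db := by ring
          push_cast; rw [this]; ring
        · rw [if_neg (fun hx => hc (hcond.mp hx)), if_neg hc]
          have : ((idx : Int) + 1) - (db + 1) = (idx : Int) - db := by ring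
          push_cast; rw [this]; ring
    · -- a counts as a cat in the prefix lists
      have hadd : dcInt (animals.take (idx + 1)) = db := by rw [hdc1, if_neg hdog]; ring
      simp only [hadd, if_neg hdog]
      have hdog' : (a == "dog") = false := by
        cases hb : (a == "dog") <;> simp_all
      have e1 : (dogsL animals).getD idx 0 = db := by rw [hdg _ h, hadd]
      have e2 : (catsL animals).getD idx 0 = ((idx : Int) + 1) - db := by
        rw [hcg _ h, hadd]
      by_cases h1 : (a == "dog" || a == "cat") = true
      · -- right-facing cat ("cat")
        simp only [if_pos h1]
        have hcond : (0 < idx ∧ (dogsL animals).getD (idx - 1) 0 > (catsL animals).getD (idx - 1) 0)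
            ↔ db > (idx : Int) - db := by
          rcases Nat.eq_zero_or_pos idx with h0 | h0
          · subst h0
            simp only [lt_irrefl, false_and, false_iff]
            simp [hdb, dcInt]
          · have f1 : (dogsL animals).getD (idx - 1) 0 = db := by
              rw [hdg _ (by omega), Nat.sub_add_cancel h0]
            have f2 : (catsL animals).getD (idx - 1) 0 = (idx : Int) - db := by
              rw [hcg _ (by omega), Nat.sub_add_cancel h0]
              have : ((idx - 1 : Nat) : Int) = (idx : Int) - 1 := by omega
              push_cast; rw [this]; ring
            rw [f1, f2]
            constructor
            · rintro ⟨-, hlt⟩; exact hlt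
            · intro hlt; exact ⟨h0, hlt⟩
        by_cases hc : db > (idx : Int) - db
        · rw [if_pos (hcond.mpr hc), if_pos hc]
          have : ((idx : Int) + 1) - db = ((idx : Int) - db) + 1 := by ring
          push_cast; rw [this]; ring
        · rw [if_neg (fun hx => hc (hcond.mp hx)), if_neg hc]
          have : ((idx : Int) + 1) - db = ((idx : Int) - db) + 1 := by ring
          push_cast; rw [this]; ring
      · by_cases h2 : (a == "god" || a == "tac") = true
        · -- left-facing cat ("tac")
          have htac : (a == "tac") = true := by
            cases hb1 : (a == "god") <;> cases hb2 : (a == "tac") <;> simp_all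
          have hgod : (a == "god") = false := by
            cases hb : (a == "god") <;> simp_all
          have hflag1 : (if (a == "god") = true then (1:Int) else 0) = 0 := by
            rw [if_neg]; simp [hgod]
          have hflag2 : (if (a == "tac") = true then (1:Int) else 0) = 1 := if_pos htac
          simp only [if_neg h1, if_pos h2, hflag1, hflag2]
          rw [hlast_d, hlast_c, e1, e2]
          have hcond : (D - db > n - D - (((idx : Int) + 1) - db))
              ↔ (D - db - 0 > n - D - ((idx : Int) - db) - 1) := by constructor <;> intro <;> omega
          by_cases hc : D - db - 0 > n - D - ((idx : Int) - db) - 1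
          · rw [if_pos (hcond.mpr hc), if_pos hc]
            have : ((idx : Int) + 1) - db = ((idx : Int) - db) + 1 := by ring
            push_cast; rw [this]; ring
          · rw [if_neg (fun hx => hc (hcond.mp hx)), if_neg hc]
            have : ((idx : Int) + 1) - db = ((idx : Int) - db) + 1 := by ring
            push_cast; rw [this]; ring
        · -- neither growl branch fires
          simp only [if_neg h1, if_neg h2]
          have : ((idx : Int) + 1) - db = ((idx : Int) - db) + 1 := by ring
          push_cast; rw [this]; ring

lemma bfold_eq (D C : Int) (l : List String) : ∀ (db cb g : Int),
    (l.foldl (cgAltStep D C) (db, cb, g)).2.2 = g + cgSpec D C db cb l := by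
  induction l with
  | nil => intro db cb g; simp [cgSpec]
  | cons a t ih =>
    intro db cb g
    simp only [List.foldl_cons, cgAltStep, cgSpec]
    split_ifs <;> simp [ih] <;> ring

lemma total_dogs_eq (l : List String) :
    ((l.filter (fun a => a == "dog" || a == "god")).map (fun _ => (1 : Int))).sum = dcInt l := by
  induction l with
  | nil => simp [dcInt]
  | cons a t ih =>
    by_cases h : (a == "dog" || a == "god") = true <;>
      simp [h, dcInt, List.countP_eq_length_filter] <;> try ring

lemma phase1_dogs (animals : List String) :
    (animals.foldl cgStep ([], [], 0, 0)).1 = dogsL animals := by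
  rw [phase1_eq]
  simp [dogsL]

lemma phase1_cats (animals : List String) :
    (animals.foldl cgStep ([], [], 0, 0)).2.1 = catsL animals := by
  rw [phase1_eq]
  simp only [catsL, List.nil_append]
  apply List.map_congr_left; intro k _; ring

-- ===== VERDICT (by name: the statement is the Claim_ definition above) =====
theorem count_growlers_spec : Claim_equal_count_growlers := by
  intro animals _
  unfold Spec_count_growlers count_growlers count_growlers_alt
  simp only [phase1_dogs, phase1_cats, total_dogs_eq]
  rw [cgLoop_eq animals (animals.length - 0) 0 rfl 0, bfold_eq]
  simp [dcInt]
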